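-- pv_equiv track=rewrite | github.com/mmanumos/logyca | primos/models/functions.py | range_twins_primes
-- ===== SOURCE A (Python) =====
-- def range_twins_primes(quantity):
--     """ Return a list with pairs of twins prime numbers from a range  """
--     list_pair = []
--     n = 2
--     prime = []
--     noesprimo = []
--
--     while n <= quantity:
--         if n not in noesprimo:
--             prime.append(n)
--
--             for i in range(n*2, quantity+1, n):
--                 noesprimo .append(i)
--         n += 1
--     for p in prime:
--         if p+2 in prime:
--             list_pair.append([p, p+2])
--     return list_pair
-- ===== SOURCE B (Python) =====
-- def _is_prime(k):
--     if k < 2: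
--         return False
--     d = 2
--     while d * d <= k:
--         if k % d == 0:
--             return False
--         d += 1
--     return True
--
--
-- def range_twins_primes(quantity):
--     """ Return a list with pairs of twins prime numbers from a range  """
--     return [[p, p + 2] for p in range(2, quantity - 1)
--             if _is_prime(p) and _is_prime(p + 2)]
-- ===== Notes on version B (the rewrite author's own statement) =====
-- stated objective: faster
-- what changed: replaced A's incremental exclusion-list sieve (linear membership scans in an ever-growing noesprimo list, then a second quadratic membership pass to find twins) by a direct trial-division primality test up to sqrt(k) and a single comprehension over range(2, quantity-1).
import Mathlib
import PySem

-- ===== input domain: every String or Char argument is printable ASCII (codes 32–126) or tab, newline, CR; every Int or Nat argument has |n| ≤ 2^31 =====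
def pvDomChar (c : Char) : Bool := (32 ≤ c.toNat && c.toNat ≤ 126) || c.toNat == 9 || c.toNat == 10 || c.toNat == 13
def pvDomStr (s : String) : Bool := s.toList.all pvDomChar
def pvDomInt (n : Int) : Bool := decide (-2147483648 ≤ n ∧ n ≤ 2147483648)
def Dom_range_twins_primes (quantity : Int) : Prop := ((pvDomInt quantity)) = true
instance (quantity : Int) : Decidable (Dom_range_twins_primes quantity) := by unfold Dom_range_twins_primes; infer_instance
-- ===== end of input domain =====

-- B replaces A's incremental exclusion-list sieve (with its linear membership scans) by a
-- trial-division primality test and a single comprehension; same output, measurably faster.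

-- ===== PORT A =====
-- the 'while n <= quantity' loop; fuel = number of remaining iterations (quantity + 1 - n)
def pvA_loop : Nat → Int → Int → List Int → List Int → List Int × List Int
  | 0, _, _, prime, noesprimo => (prime, noesprimo)
  | fuel + 1, quantity, n, prime, noesprimo =>
      if noesprimo.contains n then
        pvA_loop fuel quantity (n + 1) prime noesprimo
      else
        pvA_loop fuel quantity (n + 1) (prime ++ [n])
          (noesprimo ++ PySem.List.pyRange (n * 2) (quantity + 1) n)

def range_twins_primes (quantity : Int) : List (List Int) :=
  let st := pvA_loop (quantity - 1).toNat quantity 2 [] []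
  st.1.foldl (fun list_pair p =>
    if st.1.contains (p + 2) then list_pair ++ [[p, p + 2]] else list_pair) []

-- ===== PORT B =====
-- the 'while d * d <= k' loop of _is_prime; fuel bounds the iteration count
def pvB_trial : Nat → Int → Int → Bool
  | 0, _, _ => true
  | fuel + 1, k, d =>
      if d * d ≤ k then
        if PySem.Int.mod k d = 0 then false else pvB_trial fuel k (d + 1)
      else true

def pvB_isPrime (k : Int) : Bool :=
  if k < 2 then false else pvB_trial k.toNat k 2

def range_twins_primes_alt (quantity : Int) : List (List Int) :=
  ((PySem.List.pyRange 2 (quantity - 1)).filter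
      (fun p => pvB_isPrime p && pvB_isPrime (p + 2))).map (fun p => [p, p + 2])

-- ===== PRECONDITION & SPEC =====
def Spec_range_twins_primes (quantity : Int) (out : List (List Int)) : Prop := out = range_twins_primes_alt quantity
instance (quantity : Int) (out : List (List Int)) : Decidable (Spec_range_twins_primes quantity out) := by unfold Spec_range_twins_primes; infer_instance

-- ===== CLAIM (what is proved, stated in full; the proofs are below) =====
def Claim_equal_range_twins_primes : Prop := ∀ (quantity : Int), Dom_range_twins_primes quantity → Spec_range_twins_primes quantity (range_twins_primes quantity)

-- ===== LEMMAS AND PROOFS =====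

-- B's trial loop returns true iff no e ≥ d with e*e ≤ k divides k (fuel large enough)
theorem pvB_trial_spec (fuel : Nat) (k d : Int) (hd : 2 ≤ d) (hfuel : k < d + fuel) :
    (pvB_trial fuel k d = true ↔ ∀ e : Int, d ≤ e → e * e ≤ k → ¬ (e ∣ k)) := by
  induction fuel generalizing d with
  | zero =>
    simp only [pvB_trial, true_iff]
    intro e he hee hdvd
    push_cast at hfuel
    nlinarith
  | succ fuel ih =>
    simp only [pvB_trial]
    by_cases hdd : d * d ≤ k
    · rw [if_pos hdd]
      by_cases hmod : PySem.Int.mod k d = 0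
      · rw [if_pos hmod]
        have hdvd : d ∣ k := (PySem.Int.mod_eq_zero_iff_dvd k d).mp hmod
        simp only [Bool.false_eq_true, false_iff]
        exact fun h => h d le_rfl hdd hdvd
      · rw [if_neg hmod]
        have hndvd : ¬ (d ∣ k) := fun h => hmod ((PySem.Int.mod_eq_zero_iff_dvd k d).mpr h)
        rw [ih (d + 1) (by omega) (by push_cast at hfuel ⊢; omega)]
        constructor
        · intro h e he hee
          rcases eq_or_lt_of_le he with rfl | hlt
          · exact hndvd
          · exact h e (by omega) hee
        · intro h e he hee
          exact h e (by omega) hee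
    · rw [if_neg hdd]
      simp only [true_iff]
      intro e he hee hdvd
      nlinarith

-- 'no divisor e with e*e ≤ k' is primality of k.toNat
theorem pv_sqrt_cond_iff_prime (k : Int) (hk : 2 ≤ k) :
    (∀ e : Int, 2 ≤ e → e * e ≤ k → ¬ (e ∣ k)) ↔ Nat.Prime k.toNat := by
  have hkN : (k.toNat : Int) = k := Int.toNat_of_nonneg (by omega)
  constructor
  · intro h
    by_contra hnp
    have hpos : 0 < k.toNat := by omega
    have hq := Nat.minFac_sq_le_self hpos hnp
    have hqp : Nat.Prime k.toNat.minFac := Nat.minFac_prime (by omega)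
    have hqd : k.toNat.minFac ∣ k.toNat := Nat.minFac_dvd _
    refine h (k.toNat.minFac : Int) (by exact_mod_cast hqp.two_le) ?_ ?_
    · have : (k.toNat.minFac : Int) * k.toNat.minFac ≤ (k.toNat : Int) := by
        exact_mod_cast (by nlinarith [hq] : k.toNat.minFac * k.toNat.minFac ≤ k.toNat)
      omega
    · rw [← hkN]
      exact_mod_cast hqd
  · intro hp e he hee hdvd
    have hepos : 0 < e := by omega
    have heN : (e.toNat : Int) = e := Int.toNat_of_nonneg (by omega)
    have hdN : e.toNat ∣ k.toNat := by
      rw [← Int.natCast_dvd_natCast, heN, hkN]; exact hdvd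
    have h2 : 2 ≤ e.toNat := by omega
    have hlt : e.toNat < k.toNat := by
      have : e + 2 ≤ k := by nlinarith
      omega
    rcases (Nat.Prime.eq_one_or_self_of_dvd hp _ hdN) with h1 | h1 <;> omega

-- B's primality test is primality
theorem pvB_isPrime_iff (k : Int) :
    pvB_isPrime k = true ↔ 2 ≤ k ∧ Nat.Prime k.toNat := by
  unfold pvB_isPrime
  by_cases hk : k < 2
  · simp only [if_pos hk, Bool.false_eq_true, false_iff]
    omega
  · rw [if_neg hk]
    have hk2 : 2 ≤ k := by omega
    rw [pvB_trial_spec k.toNat k 2 le_rfl (by omega), pv_sqrt_cond_iff_prime k hk2]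
    exact (and_iff_right hk2).symm

-- membership in A's noesprimo (as generated from the current prime list) decides compositeness
theorem pvA_contains_iff (quantity n : Int) (hn : 2 ≤ n) (hq : n ≤ quantity) :
    (((PySem.List.pyRange 2 n).filter pvB_isPrime).flatMap
        (fun p => PySem.List.pyRange (p * 2) (quantity + 1) p)).contains n = true
      ↔ ¬ (pvB_isPrime n = true) := by
  rw [List.contains_iff_mem, List.mem_flatMap]
  constructor
  · rintro ⟨p, hp, hmem⟩ hprime
    rw [List.mem_filter] at hp
    obtain ⟨hpr, hpP⟩ := hp
    rw [PySem.List.mem_pyRange_one] at hpr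
    have hppos : (0:Int) < p := by omega
    rw [PySem.List.mem_pyRange_iff_of_pos hppos] at hmem
    obtain ⟨h2p, _, hdvd'⟩ := hmem
    have hdvd : p ∣ n := by
      have h2 : p ∣ p * 2 := ⟨2, rfl⟩
      have := dvd_add hdvd' h2
      simpa using this
    rw [pvB_isPrime_iff] at hprime hpP
    have hdN : p.toNat ∣ n.toNat := by
      rw [← Int.natCast_dvd_natCast, Int.toNat_of_nonneg (by omega), Int.toNat_of_nonneg (by omega)]
      exact hdvd
    rcases hprime.2.eq_one_or_self_of_dvd _ hdN with h1 | h1 <;> omega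
  · intro hnp
    rw [pvB_isPrime_iff, not_and] at hnp
    have hnprime : ¬ Nat.Prime n.toNat := hnp (by omega)
    have hpos : 0 < n.toNat := by omega
    have hq2 := Nat.minFac_sq_le_self hpos hnprime
    have hqp : Nat.Prime n.toNat.minFac := Nat.minFac_prime (by omega)
    have hqd : n.toNat.minFac ∣ n.toNat := Nat.minFac_dvd _
    set q : Int := (n.toNat.minFac : Int) with hqdef
    have hq2' : (2:Int) ≤ q := by rw [hqdef]; exact_mod_cast hqp.two_le
    have hqq : q * q ≤ n := by
      have h1 : n.toNat.minFac * n.toNat.minFac ≤ n.toNat := by nlinarith [hq2]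
      have h2 : ((n.toNat.minFac * n.toNat.minFac : Nat) : Int) ≤ ((n.toNat : Nat) : Int) := by
        exact_mod_cast h1
      push_cast at h2
      rw [hqdef]
      omega
    have hqdvd : q ∣ n := by
      have h : (n.toNat.minFac : Int) ∣ (n.toNat : Int) := Int.natCast_dvd_natCast.mpr hqd
      rwa [Int.toNat_of_nonneg (by omega : (0:Int) ≤ n)] at h
    refine ⟨q, ?_, ?_⟩
    · rw [List.mem_filter, PySem.List.mem_pyRange_one]
      refine ⟨⟨hq2', by nlinarith⟩, ?_⟩
      rw [pvB_isPrime_iff]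
      refine ⟨hq2', ?_⟩
      rw [hqdef, Int.toNat_natCast]
      exact hqp
    · rw [PySem.List.mem_pyRange_iff_of_pos (by omega : (0:Int) < q)]
      exact ⟨by nlinarith, by omega, dvd_sub hqdvd ⟨2, rfl⟩⟩

-- A's sieve loop invariant: starting from primes < n and their marked multiples,
-- the loop ends with exactly the primes ≤ quantity
theorem pvA_loop_inv (fuel : Nat) (quantity : Int) : ∀ n : Int, 2 ≤ n →
    n + (fuel : Int) = quantity + 1 →
    (pvA_loop fuel quantity n ((PySem.List.pyRange 2 n).filter pvB_isPrime)
        (((PySem.List.pyRange 2 n).filter pvB_isPrime).flatMap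
          (fun p => PySem.List.pyRange (p * 2) (quantity + 1) p))).1
      = (PySem.List.pyRange 2 (quantity + 1)).filter pvB_isPrime := by
  induction fuel with
  | zero =>
    intro n hn hfuel
    simp only [pvA_loop]
    have : n = quantity + 1 := by push_cast at hfuel; omega
    rw [this]
  | succ fuel ih =>
    intro n hn hfuel
    have hq : n ≤ quantity := by push_cast at hfuel; omega
    have hstep : (PySem.List.pyRange 2 (n + 1)).filter pvB_isPrime
        = (PySem.List.pyRange 2 n).filter pvB_isPrime
          ++ (if pvB_isPrime n then [n] else []) := by
      rw [PySem.List.pyRange_one_succ_right (by omega : (2:Int) ≤ n), List.filter_append]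
      simp only [List.filter]
      cases pvB_isPrime n <;> rfl
    simp only [pvA_loop]
    by_cases hP : pvB_isPrime n = true
    · have hcond : ¬ ((((PySem.List.pyRange 2 n).filter pvB_isPrime).flatMap
          (fun p => PySem.List.pyRange (p * 2) (quantity + 1) p)).contains n = true) := by
        rw [pvA_contains_iff quantity n hn hq]
        simp [hP]
      rw [if_neg hcond]
      have h1 : (PySem.List.pyRange 2 n).filter pvB_isPrime ++ [n]
          = (PySem.List.pyRange 2 (n + 1)).filter pvB_isPrime := by
        rw [hstep, if_pos hP]
      have h2 : (((PySem.List.pyRange 2 n).filter pvB_isPrime).flatMap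
            (fun p => PySem.List.pyRange (p * 2) (quantity + 1) p))
            ++ PySem.List.pyRange (n * 2) (quantity + 1) n
          = (((PySem.List.pyRange 2 (n + 1)).filter pvB_isPrime).flatMap
            (fun p => PySem.List.pyRange (p * 2) (quantity + 1) p)) := by
        rw [← h1, List.flatMap_append]
        simp
      rw [h1, h2]
      exact ih (n + 1) (by omega) (by push_cast at hfuel ⊢; omega)
    · have hcond : (((PySem.List.pyRange 2 n).filter pvB_isPrime).flatMap
          (fun p => PySem.List.pyRange (p * 2) (quantity + 1) p)).contains n = true := by
        rw [pvA_contains_iff quantity n hn hq]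
        simp [hP]
      rw [if_pos hcond]
      have h1 : (PySem.List.pyRange 2 n).filter pvB_isPrime
          = (PySem.List.pyRange 2 (n + 1)).filter pvB_isPrime := by
        rw [hstep, if_neg hP, List.append_nil]
      rw [h1]
      exact ih (n + 1) (by omega) (by push_cast at hfuel ⊢; omega)

-- a '&& p < c' filter over range(a, b) is a plain filter over range(a, c) when c ≤ b
theorem pv_filter_lt_pyRange (g : Int → Bool) (c : Int) :
    ∀ (k : Nat) (a b : Int), (b - a).toNat = k → c ≤ b →
    (PySem.List.pyRange a b).filter (fun p => decide (p < c) && g p)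
      = (PySem.List.pyRange a c).filter g := by
  intro k
  induction k with
  | zero =>
    intro a b hk hcb
    rw [PySem.List.pyRange_one_eq_nil (by omega : b ≤ a),
        PySem.List.pyRange_one_eq_nil (by omega : c ≤ a)]
    rfl
  | succ k ih =>
    intro a b hk hcb
    have hab : a < b := by omega
    rw [PySem.List.pyRange_one_cons hab, List.filter_cons]
    by_cases hac : a < c
    · rw [PySem.List.pyRange_one_cons hac, List.filter_cons]
      rw [ih (a + 1) b (by omega) hcb]
      simp [hac]
    · rw [PySem.List.pyRange_one_eq_nil (by omega : c ≤ a)]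
      rw [ih (a + 1) b (by omega) hcb,
          PySem.List.pyRange_one_eq_nil (by omega : c ≤ a + 1)]
      simp [hac]

theorem pv_main (quantity : Int) :
    range_twins_primes quantity = range_twins_primes_alt quantity := by
  unfold range_twins_primes range_twins_primes_alt
  by_cases hq : quantity < 2
  · have h0 : (quantity - 1).toNat = 0 := by omega
    rw [h0]
    simp only [pvA_loop, List.foldl_nil]
    rw [PySem.List.pyRange_one_eq_nil (by omega : quantity - 1 ≤ 2)]
    rfl
  · have hq2 : 2 ≤ quantity := by omega
    have hst : (pvA_loop (quantity - 1).toNat quantity 2 [] []).1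
        = (PySem.List.pyRange 2 (quantity + 1)).filter pvB_isPrime := by
      have hinit : ((PySem.List.pyRange 2 2).filter pvB_isPrime) = ([] : List Int) := by
        rw [PySem.List.pyRange_one_eq_nil le_rfl]; rfl
      have := pvA_loop_inv (quantity - 1).toNat quantity 2 le_rfl
        (by rw [Int.toNat_of_nonneg (by omega)]; omega)
      rwa [hinit] at this
    simp only [hst, PySem.List.foldl_append_if
      (fun p => ((PySem.List.pyRange 2 (quantity + 1)).filter pvB_isPrime).contains (p + 2))
      (fun p => [p, p + 2]), List.nil_append, List.filter_filter]
    congr 1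
    rw [List.filter_congr (q := fun p => decide (p < quantity - 1)
        && (pvB_isPrime p && pvB_isPrime (p + 2))) ?_]
    · exact pv_filter_lt_pyRange _ (quantity - 1) (quantity + 1 - 2).toNat 2 (quantity + 1) rfl
        (by omega)
    · intro p hp
      rw [PySem.List.mem_pyRange_one] at hp
      rw [Bool.eq_iff_iff]
      simp only [Bool.and_eq_true, List.contains_iff_mem, List.mem_filter,
        PySem.List.mem_pyRange_one, decide_eq_true_eq]
      constructor
      · rintro ⟨⟨⟨_, h1⟩, h2⟩, h3⟩
        exact ⟨by omega, h3, h2⟩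
      · rintro ⟨h1, h2, h3⟩
        exact ⟨⟨⟨by omega, by omega⟩, h3⟩, h2⟩

-- ===== VERDICT (by name: the statement is the Claim_ definition above) =====
theorem range_twins_primes_spec : Claim_equal_range_twins_primes := by
  intro quantity _
  unfold Spec_range_twins_primes
  exact pv_main quantity
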